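-- pv_equiv track=rewrite | github.com/timinglost/-Python | task2-5.py | symbols
-- ===== SOURCE A (Python) =====
-- def symbols(num, counter):
--     if num > 127:
--         return ''
--     answer = ''
--     answer = answer + f'{num} - {chr(num)} '
--     if counter == 1:
--         counter = 11
--         answer += '\n'
--     return answer + symbols(num + 1, counter - 1)
-- ===== SOURCE B (Python) =====
-- def symbols(num, counter):
--     # Build all cells at once, then mark the newline positions arithmetically:
--     # the recursion appends '\n' at step counter-1 (0-indexed) and every 10 steps after.
--     cells = [f'{n} - {chr(n)} ' for n in range(num, 128)]
--     if counter >= 1: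
--         for i in range(counter - 1, len(cells), 10):
--             cells[i] += '\n'
--     return ''.join(cells)
-- ===== Notes on version B (the rewrite author's own statement) =====
-- stated objective: alternative
-- what changed: Replaced the stateful counter recursion by a closed-form construction: build the list of cells with a comprehension over range(num,128), mark the newline positions arithmetically (indices counter-1, counter-1+10, ...) with an index loop, and join once.
import Mathlib
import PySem

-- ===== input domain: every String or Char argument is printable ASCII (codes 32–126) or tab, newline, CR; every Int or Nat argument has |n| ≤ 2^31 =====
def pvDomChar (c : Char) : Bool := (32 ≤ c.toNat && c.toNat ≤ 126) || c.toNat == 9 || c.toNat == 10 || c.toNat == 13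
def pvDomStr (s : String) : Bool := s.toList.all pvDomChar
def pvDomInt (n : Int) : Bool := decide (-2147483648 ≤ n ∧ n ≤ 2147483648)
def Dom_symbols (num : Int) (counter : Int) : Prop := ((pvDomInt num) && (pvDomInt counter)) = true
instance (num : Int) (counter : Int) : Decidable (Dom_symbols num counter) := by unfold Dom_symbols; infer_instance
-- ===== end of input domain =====

-- B replaces A's stateful counter recursion by a closed-form construction: build all cells
-- with a comprehension, mark newline positions arithmetically, join once (objective: alternative).

-- ===== PORT A =====
-- the string appended for code num: f'{num} - {chr(num)} ' (chr exact for 0 ≤ num ≤ 127, i.e. on Pre_)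
def symCellA (num : Int) : String :=
  PySem.Int.toStr num ++ " - " ++ String.ofList [Char.ofNat num.toNat] ++ " "

def symbols (num : Int) (counter : Int) : String :=
  if num > 127 then ""
  else
    let answer := symCellA num
    let (counter, answer) := if counter = 1 then (11, answer ++ "\n") else (counter, answer)
    answer ++ symbols (num + 1) (counter - 1)
termination_by (128 - num).toNat
decreasing_by omega

-- ===== PORT B =====
-- the cell of the comprehension: f'{n} - {chr(n)} '
def symCellB (n : Int) : String :=
  PySem.Int.toStr n ++ (" - " ++ (String.ofList [Char.ofNat n.toNat] ++ " "))

-- the 'if counter >= 1: for i in range(counter-1, len(cells), 10): cells[i] += "\n"' block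
def addNewlines (counter : Int) (cells : List String) : List String :=
  if 1 ≤ counter then
    (PySem.List.pyRange (counter - 1) (cells.length : Int) 10).foldl
      (fun cs i => cs.modify i.toNat (· ++ "\n")) cells
  else cells

def symbols_alt (num : Int) (counter : Int) : String :=
  PySem.Str.join "" (addNewlines counter ((PySem.List.pyRange num 128 1).map symCellB))

-- ===== PRECONDITION & SPEC =====
-- Pre_ excludes num < 0, on which the Python A raises ValueError (chr of a negative code); B raises there too.
def Pre_symbols (num : Int) (counter : Int) : Prop := 0 ≤ num
instance (num : Int) (counter : Int) : Decidable (Pre_symbols num counter) := by unfold Pre_symbols; infer_instance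
def pvWitness_symbols : Int × Int := (120, 3)

def Spec_symbols (num : Int) (counter : Int) (out : String) : Prop := out = symbols_alt num counter
instance (num : Int) (counter : Int) (out : String) : Decidable (Spec_symbols num counter out) := by unfold Spec_symbols; infer_instance

-- ===== CLAIM (what is proved, stated in full; the proofs are below) =====
def Claim_equal_symbols : Prop := ∀ (num : Int) (counter : Int), Dom_symbols num counter → Pre_symbols num counter → Spec_symbols num counter (symbols num counter)

-- ===== LEMMAS AND PROOFS =====

-- ''.join over a cons
theorem chars_join_nil_cons (x : List Char) (l : List (List Char)) :
    PySem.Chars.join [] (x :: l) = x ++ PySem.Chars.join [] l := by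
  cases l with
  | nil => simp [PySem.Chars.join_singleton, PySem.Chars.join_nil]
  | cons y r => rw [PySem.Chars.join_cons_cons]; simp

theorem join_empty_cons (x : String) (l : List String) :
    PySem.Str.join "" (x :: l) = x ++ PySem.Str.join "" l := by
  simp [PySem.Str.join, chars_join_nil_cons]

-- shifting a step-10 range down by one
theorem pyRange10_shift (a b : Int) :
    (PySem.List.pyRange a b 10).map (· - 1) = PySem.List.pyRange (a - 1) (b - 1) 10 := by
  rw [PySem.List.pyRange_of_pos a b (by norm_num),
    PySem.List.pyRange_of_pos (a - 1) (b - 1) (by norm_num), List.map_map]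
  by_cases hab : a < b
  · rw [if_pos hab, if_pos (by omega : a - 1 < b - 1),
      (by ring : b - 1 - (a - 1) = b - a)]
    apply List.map_congr_left
    intro k _
    simp only [Function.comp_apply]
    ring
  · rw [if_neg hab, if_neg (by omega : ¬ (a - 1 < b - 1))]
    simp

-- peeling the first element off a nonempty step-10 range
theorem pyRange10_cons (a b : Int) (h : a < b) :
    PySem.List.pyRange a b 10 = a :: PySem.List.pyRange (a + 10) b 10 := by
  rw [PySem.List.pyRange_of_pos a b (by norm_num),
    PySem.List.pyRange_of_pos (a + 10) b (by norm_num), if_pos h]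
  have hm : ((b - a + 10 - 1) / 10).toNat
      = (if a + 10 < b then ((b - (a + 10) + 10 - 1) / 10).toNat else 0) + 1 := by
    by_cases h2 : a + 10 < b <;> simp only [h2, if_true, if_false] <;> omega
  rw [hm, List.range_succ_eq_map, List.map_cons, List.map_map]
  refine congrArg₂ List.cons (by simp) ?_
  apply List.map_congr_left
  intro k _
  simp only [Function.comp_apply, Nat.succ_eq_add_one]
  push_cast
  ring

-- a fold of index-modifies with all indices ≥ 1 passes over the head of the list
theorem foldl_modify_cons : ∀ (l : List Int), (∀ i ∈ l, 1 ≤ i) → ∀ (x : String) (rest : List String),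
    l.foldl (fun cs i => cs.modify i.toNat (· ++ "\n")) (x :: rest)
      = x :: (l.map (· - 1)).foldl (fun cs i => cs.modify i.toNat (· ++ "\n")) rest := by
  intro l
  induction l with
  | nil => intro _ x rest; simp
  | cons i t ih =>
    intro h x rest
    have hi : 1 ≤ i := h i (List.mem_cons_self ..)
    have hsea : i.toNat = (i - 1).toNat + 1 := by omega
    simp only [List.foldl_cons, List.map_cons, hsea, List.modify_succ_cons]
    exact ih (fun j hj => h j (List.mem_cons_of_mem _ hj)) x _

-- the structural recursion the newline-marking pass satisfies (proof-only helper)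
def markRec : Int → List String → List String
  | _, [] => []
  | c, x :: rest => (if c = 1 then x ++ "\n" else x) :: markRec (if c = 1 then 10 else c - 1) rest

theorem addNewlines_nil (c : Int) : addNewlines c [] = [] := by
  unfold addNewlines
  by_cases hc : 1 ≤ c
  · rw [if_pos hc, PySem.List.pyRange_of_pos _ _ (by norm_num),
      if_neg (by simp; omega : ¬ ((c - 1 : Int) < (([] : List String).length : Int)))]
    simp
  · rw [if_neg hc]

theorem addNewlines_cons (c : Int) (x : String) (rest : List String) :
    addNewlines c (x :: rest)
      = (if c = 1 then x ++ "\n" else x) :: addNewlines (if c = 1 then 10 else c - 1) rest := by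
  by_cases hc1 : c = 1
  · subst hc1
    unfold addNewlines
    norm_num
    have hlen : (0 : Int) < (rest.length : Int) + 1 := by positivity
    rw [pyRange10_cons 0 _ hlen, List.foldl_cons]
    have h0 : (x :: rest).modify (0 : Int).toNat (· ++ "\n") = (x ++ "\n") :: rest := by
      simp [List.modify_zero_cons]
    rw [h0, foldl_modify_cons _ (fun i hi => by
        have := (PySem.List.mem_pyRange_iff_of_pos (by norm_num : (0:Int) < 10) i).mp hi
        omega), pyRange10_shift]
    norm_num
  · unfold addNewlines
    rw [if_neg hc1, if_neg hc1]
    by_cases hc : 1 ≤ c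
    · rw [if_pos hc, if_pos (by omega : 1 ≤ c - 1)]
      rw [foldl_modify_cons _ (fun i hi => by
          have := (PySem.List.mem_pyRange_iff_of_pos (by norm_num : (0:Int) < 10) i).mp hi
          omega), pyRange10_shift]
      have : ((x :: rest).length : Int) - 1 = (rest.length : Int) := by simp
      rw [this]
    · rw [if_neg hc, if_neg (by omega : ¬ (1 ≤ c - 1))]

theorem addNewlines_eq_markRec : ∀ (cells : List String) (c : Int),
    addNewlines c cells = markRec c cells := by
  intro cells
  induction cells with
  | nil => intro c; rw [addNewlines_nil, markRec]
  | cons x rest ih => intro c; rw [addNewlines_cons, markRec, ih]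

theorem symCellA_eq (n : Int) : symCellA n = symCellB n := by
  simp [symCellA, symCellB, String.append_assoc]

-- main invariant: A's recursion computes the join of the marked cell list
theorem symbols_eq_join (n : Nat) : ∀ (num c : Int), (128 - num).toNat ≤ n →
    symbols num c = PySem.Str.join "" (markRec c ((PySem.List.pyRange num 128 1).map symCellB)) := by
  induction n with
  | zero =>
    intro num c h
    rw [symbols, if_pos (by omega : num > 127),
      PySem.List.pyRange_one_eq_nil (by omega : (128 : Int) ≤ num)]
    simp [markRec, PySem.Str.join, PySem.Chars.join_nil]
  | succ n ih =>
    intro num c h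
    by_cases h127 : num > 127
    · rw [symbols, if_pos h127, PySem.List.pyRange_one_eq_nil (by omega : (128 : Int) ≤ num)]
      simp [markRec, PySem.Str.join, PySem.Chars.join_nil]
    · rw [symbols, if_neg h127, PySem.List.pyRange_one_cons (by omega : num < 128),
        List.map_cons, markRec, join_empty_cons]
      by_cases hc : c = 1
      · simp only [hc, if_true]
        rw [ih (num + 1) (11 - 1) (by omega)]
        rw [symCellA_eq]
        norm_num
      · simp only [hc, if_false]
        rw [ih (num + 1) (c - 1) (by omega), symCellA_eq]

-- ===== VERDICT (by name: the statement is the Claim_ definition above) =====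
theorem symbols_spec : Claim_equal_symbols := by
  intro num counter _ _
  unfold Spec_symbols symbols_alt
  rw [addNewlines_eq_markRec, symbols_eq_join (128 - num).toNat num counter le_rfl]
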